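-- pv_equiv track=rewrite | github.com/IgrMd/yandex-algos-training | Тренировки по алгоритмам 3.0/Дивизион A/Тема 1. Стеки/15.py | to_tags
-- ===== SOURCE A (Python) =====
-- def to_tags(xml):
--     if xml[0] != '<' or xml[-1] != '>':
--         return None
--     size = len(xml)
--     tags = []
--     i, j = 0, 0
--     while i < size and j < size:
--         if xml[i] != '<':
--             return None
--         j = i + 1
--         while i < size and xml[j] != '>':
--             if xml[j] == '<':
--                 return None
--             j += 1
--         tags.append(xml[i + 1:j])
--         i = j + 1
--     return tags
-- ===== SOURCE B (Python) =====
-- def to_tags(xml):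
--     if xml[0] != '<' or xml[-1] != '>':
--         return None
--     tags = []
--     for seg in xml.split('>')[:-1]:
--         body = seg[1:]
--         if not seg.startswith('<') or '<' in body:
--             return None
--         tags.append(body)
--     return tags
-- ===== Notes on version B (the rewrite author's own statement) =====
-- stated objective: idiomatic
-- what changed: Replaces the hand-rolled two-index while-loop scan with one str.split on the closing-bracket delimiter, dropping the trailing empty piece, followed by a single validating pass over the segments.
import Mathlib
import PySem

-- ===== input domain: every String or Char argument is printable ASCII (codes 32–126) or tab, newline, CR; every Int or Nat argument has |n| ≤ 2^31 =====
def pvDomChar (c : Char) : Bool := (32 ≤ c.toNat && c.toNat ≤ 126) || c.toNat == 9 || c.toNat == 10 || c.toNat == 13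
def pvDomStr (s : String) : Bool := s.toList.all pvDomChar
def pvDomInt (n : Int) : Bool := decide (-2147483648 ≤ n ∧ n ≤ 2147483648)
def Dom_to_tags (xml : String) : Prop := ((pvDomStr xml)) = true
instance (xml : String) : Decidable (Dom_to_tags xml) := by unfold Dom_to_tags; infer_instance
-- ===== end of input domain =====

-- B splits the string once on the closing-bracket delimiter and validates the segments in one pass, instead of A's two-index while-loop scan (idiomatic; no mutation).

-- ===== PORT A =====
-- inner while loop: `while i < size and xml[j] != '>': if xml[j] == '<': return None; j += 1`
-- (out-of-range xml[j] is a Python IndexError, modelled as `none`; unreachable inside Pre_)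
def toTagsInner (cs : List Char) (i j : Nat) : Option Nat :=
  if i < cs.length then
    if hj : j < cs.length then
      if cs[j] = '>' then some j
      else if cs[j] = '<' then none
      else toTagsInner cs i (j + 1)
    else none
  else some j
termination_by cs.length - j
decreasing_by omega

theorem toTagsInner_le (cs : List Char) (i j j2 : Nat)
    (h : toTagsInner cs i j = some j2) : j ≤ j2 := by
  fun_induction toTagsInner cs i j <;> simp_all <;> omega

-- outer while loop of A
def toTagsOuter (cs : List Char) (i j : Nat) (tags : List String) : Option (List String) :=
  if h : i < cs.length ∧ j < cs.length then
    if cs[i]'h.1 ≠ '<' then none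
    else
      match hm : toTagsInner cs i (i + 1) with
      | none => none
      | some j2 =>
          toTagsOuter cs (j2 + 1) j2
            (tags ++ [String.ofList (PySem.List.slice cs (some ((i : Int) + 1)) (some (j2 : Int)))])
  else some tags
termination_by cs.length - i
decreasing_by have := toTagsInner_le cs i (i + 1) j2 hm; omega

def to_tags (xml : String) : Option (List String) :=
  let cs := xml.toList
  match PySem.List.pyGet? cs 0, PySem.List.pyGet? cs (-1) with
  | some c0, some c1 =>
      if c0 ≠ '<' ∨ c1 ≠ '>' then none
      else toTagsOuter cs 0 0 []
  | _, _ => none  -- empty string: IndexError in Python (outside Pre_)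

-- ===== PORT B =====
-- the `for seg in xml.split('>')[:-1]` loop of B
def goB : List String → List String → Option (List String)
  | [], tags => some tags
  | seg :: rest, tags =>
      let body := PySem.Str.slice seg (some 1) none
      if !(PySem.Str.startswith seg "<") || PySem.Str.isIn "<" body then none
      else goB rest (tags ++ [body])

def to_tags_alt (xml : String) : Option (List String) :=
  match PySem.Str.pyGet? xml 0 with
  | none => none  -- empty string: IndexError in Python (outside Pre_)
  | some c0 =>
    match PySem.Str.pyGet? xml (-1) with
    | none => none
    | some c1 =>
      if c0 ≠ '<' ∨ c1 ≠ '>' then none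
      else
        match PySem.Str.split? xml ">" with
        | none => none
        | some segs => goB (PySem.List.slice segs none (some (-1))) []

-- ===== PRECONDITION & SPEC =====
-- Pre_ excludes only the empty string, on which A (xml[0]) raises IndexError.
def Pre_to_tags (xml : String) : Prop := xml ≠ ""
instance (xml : String) : Decidable (Pre_to_tags xml) := by unfold Pre_to_tags; infer_instance
def pvWitness_to_tags : String := ("<a>")

def Spec_to_tags (xml : String) (out : Option (List String)) : Prop := out = to_tags_alt xml
instance (xml : String) (out : Option (List String)) : Decidable (Spec_to_tags xml out) := by
  unfold Spec_to_tags; infer_instance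

-- ===== CLAIM (what is proved, stated in full; the proofs are below) =====
def Claim_equal_to_tags : Prop := ∀ (xml : String), Dom_to_tags xml → Pre_to_tags xml → Spec_to_tags xml (to_tags xml)

-- ===== LEMMAS AND PROOFS =====

-- pure recursion mirroring A's inner scan on the suffix
def innerPure : List Char → Option Nat
  | [] => none
  | c :: t => if c = '>' then some 0 else if c = '<' then none else (innerPure t).map (· + 1)

-- pure recursion mirroring A's outer loop on the suffix
def outerPure : List Char → List String → Option (List String)
  | [], tags => some tags
  | c :: t, tags =>
      if c ≠ '<' then none
      else
        match innerPure t with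
        | none => none
        | some k => outerPure (t.drop (k + 1)) (tags ++ [String.ofList (t.take k)])
termination_by l _ => l.length
decreasing_by simp only [List.length_drop, List.length_cons]; omega

-- pure version of split on '>'
def splitAux : List Char → List Char → List (List Char)
  | pre, [] => [pre]
  | pre, c :: t => if c = '>' then pre :: splitAux [] t else splitAux (pre ++ [c]) t

theorem splitAux_ne_nil (pre l : List Char) : splitAux pre l ≠ [] := by
  induction l generalizing pre with
  | nil => simp [splitAux]
  | cons c t ih =>
      simp only [splitAux]; split
      · simp
      · exact ih _

theorem splitAux_length (pre l : List Char) :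
    (splitAux pre l).length = l.count '>' + 1 := by
  induction l generalizing pre with
  | nil => simp [splitAux]
  | cons c t ih =>
      simp only [splitAux]; split <;> simp_all [List.count_cons]

theorem splitAux_shape (l pre : List Char) :
    splitAux pre l = (pre ++ (splitAux [] l).headI) :: (splitAux [] l).tail := by
  induction l generalizing pre with
  | nil => simp [splitAux]
  | cons c t ih =>
      by_cases hc : c = '>'
      · simp [splitAux, hc]
      · rw [show splitAux pre (c :: t) = splitAux (pre ++ [c]) t by simp [splitAux, hc],
           show splitAux [] (c :: t) = splitAux [c] t by simp [splitAux, hc],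
           ih (pre ++ [c]), ih [c]]
        simp


theorem splitOnGo_eq (fuel : Nat) :
    ∀ (l cur : List Char) (acc : List (List Char)), l.length < fuel →
      PySem.Chars.splitOn.go ['>'] fuel l cur acc = acc.reverse ++ splitAux cur.reverse l := by
  induction fuel with
  | zero => intro l cur acc h; omega
  | succ f ih =>
      intro l cur acc h
      cases l with
      | nil => simp [PySem.Chars.splitOn.go, splitAux]
      | cons c t =>
          by_cases hc : c = '>'
          · subst hc
            rw [show PySem.Chars.splitOn.go ['>'] (f+1) ('>'::t) cur acc
                  = PySem.Chars.splitOn.go ['>'] f t [] (cur.reverse :: acc) by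
                  simp [PySem.Chars.splitOn.go, List.isPrefixOf]]
            rw [ih t [] (cur.reverse :: acc) (by simpa using Nat.lt_of_succ_lt_succ h)]
            simp [splitAux]
          · have hc2 : ¬ ('>' = c) := fun h => hc h.symm
            rw [show PySem.Chars.splitOn.go ['>'] (f+1) (c::t) cur acc
                  = PySem.Chars.splitOn.go ['>'] f t (c :: cur) acc by
                  simp [PySem.Chars.splitOn.go, List.isPrefixOf, hc2]]
            rw [ih t (c :: cur) acc (by simpa using Nat.lt_of_succ_lt_succ h)]
            simp [splitAux, hc]

theorem splitOn_eq (l : List Char) : PySem.Chars.splitOn l ['>'] = splitAux [] l := by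
  rw [PySem.Chars.splitOn, splitOnGo_eq (l.length + 1) l [] [] (by omega)]
  simp

theorem inner_eq (cs : List Char) (i : Nat) (hi : i < cs.length) :
    ∀ j, toTagsInner cs i j = (innerPure (cs.drop j)).map (j + ·) := by
  intro j
  fun_induction toTagsInner cs i j with
  | case1 j hj hlt hgt =>
      rw [List.drop_eq_getElem_cons hlt]
      simp [innerPure, hgt]
  | case2 j hj hlt hgt hlt2 =>
      rw [List.drop_eq_getElem_cons hlt]
      simp [innerPure, hgt, hlt2]
  | case3 j hj hlt hgt hlt2 ih =>
      rw [List.drop_eq_getElem_cons hlt]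
      simp only [innerPure, hgt, hlt2, if_false, ih]
      cases innerPure (cs.drop (j+1)) <;> simp <;> omega
  | case4 j hj hge =>
      rw [List.drop_eq_nil_of_le (by omega)]
      simp [innerPure]
  | case5 j h => omega

theorem innerPure_lt (t : List Char) (k : Nat) (h : innerPure t = some k) : k < t.length := by
  induction t generalizing k with
  | nil => simp [innerPure] at h
  | cons c r ih =>
      simp only [innerPure] at h
      split_ifs at h with h1 h2
      · simp at h ⊢; omega
      · cases hr : innerPure r with
        | none => rw [hr] at h; simp at h
        | some k' => rw [hr] at h; simp at h; have := ih k' hr; simp; omega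

theorem outer_eq (cs : List Char) (i j : Nat) (tags : List String) :
    j < cs.length → toTagsOuter cs i j tags = outerPure (cs.drop i) tags := by
  fun_induction toTagsOuter cs i j tags with
  | case1 i j tags h hc =>
      intro hj
      rw [List.drop_eq_getElem_cons h.1, outerPure]
      simp [hc]
  | case2 i j tags h hc hm =>
      intro hj
      have hc' : cs[i] = '<' := by simpa using hc
      have := inner_eq cs i h.1 (i+1)
      rw [hm] at this
      have hnone : innerPure (cs.drop (i+1)) = none := by
        cases hk : innerPure (cs.drop (i+1)) <;> rw [hk] at this <;> simp_all
      rw [List.drop_eq_getElem_cons h.1, outerPure]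
      simp [hc', hnone]
  | case3 i j tags h hc j2 hm ih =>
      intro hj
      have hc' : cs[i] = '<' := by simpa using hc
      have heq := inner_eq cs i h.1 (i+1)
      rw [hm] at heq
      obtain ⟨k, hk, hk2⟩ : ∃ k, innerPure (cs.drop (i+1)) = some k ∧ j2 = i + 1 + k := by
        cases hkk : innerPure (cs.drop (i+1)) <;> rw [hkk] at heq <;> simp_all
      have hklt : k < (cs.drop (i+1)).length := innerPure_lt _ _ hk
      have hj2 : j2 < cs.length := by simp at hklt; omega
      have hslice : PySem.List.slice cs (some ((i : Int) + 1)) (some ((j2 : Nat) : Int))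
          = (cs.drop (i+1)).take k := by
        have h1 : ((i : Int) + 1) = ((i + 1 : Nat) : Int) := by push_cast; ring
        rw [h1, PySem.List.slice_natCast]
        congr 1; omega
      rw [ih hj2, List.drop_eq_getElem_cons h.1]
      conv_rhs => rw [outerPure]
      simp only [hc', ne_eq, not_true_eq_false, if_false, hk]
      rw [hslice, List.drop_drop]
      congr 2
      omega
  | case4 i j tags h =>
      intro hj
      have hi : ¬ i < cs.length := by tauto
      rw [List.drop_eq_nil_of_le (by omega)]
      simp [outerPure]

-- characterization of A's inner scan by the head segment of the split
theorem innerPure_split (t : List Char) (ht : '>' ∈ t) :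
    (('<' ∈ (splitAux [] t).headI → innerPure t = none) ∧
     ('<' ∉ (splitAux [] t).headI →
        innerPure t = some (splitAux [] t).headI.length ∧
        t.take (splitAux [] t).headI.length = (splitAux [] t).headI ∧
        splitAux [] (t.drop ((splitAux [] t).headI.length + 1)) = (splitAux [] t).tail)) := by
  induction t with
  | nil => simp at ht
  | cons c r ih =>
      by_cases hgt : c = '>'
      · subst hgt
        simp [splitAux, innerPure]
      · have hsh : splitAux [] (c :: r) = (c :: (splitAux [] r).headI) :: (splitAux [] r).tail := by
          rw [show splitAux [] (c :: r) = splitAux [c] r by simp [splitAux, hgt],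
              splitAux_shape r [c]]
          simp
        have hr : '>' ∈ r := by cases ht with | head => exact absurd rfl hgt | tail _ h => exact h
        by_cases hlt : c = '<'
        · subst hlt
          rw [hsh]
          simp [innerPure]
        · obtain ⟨ih1, ih2⟩ := ih hr
          rw [hsh]
          constructor
          · intro hmem
            have : '<' ∈ (splitAux [] r).headI := by
              simp at hmem
              rcases hmem with h | h
              · exact absurd h.symm hlt
              · exact h
            simp [innerPure, hgt, hlt, ih1 this]
          · intro hmem
            have hm' : '<' ∉ (splitAux [] r).headI := by simp at hmem; tauto
            obtain ⟨e1, e2, e3⟩ := ih2 hm'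
            refine ⟨?_, ?_, ?_⟩
            · simp [innerPure, hgt, hlt, e1]
            · simpa using e2
            · simpa using e3

-- pure char-level version of B's loop
def goBC : List (List Char) → List String → Option (List String)
  | [], tags => some tags
  | seg :: rest, tags =>
      match seg with
      | [] => none
      | c :: body =>
          if c ≠ '<' then none
          else if '<' ∈ body then none
          else goBC rest (tags ++ [String.ofList body])

theorem strOfList_slice_one (l : List Char) :
    PySem.Str.slice (String.ofList l) (some 1) none = String.ofList l.tail := by
  rw [← String.toList_inj]
  simp [PySem.List.slice_from_one]

theorem goB_eq_goBC (segs : List (List Char)) (tags : List String) :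
    goB (segs.map String.ofList) tags = goBC segs tags := by
  induction segs generalizing tags with
  | nil => simp [goB, goBC]
  | cons seg rest ih =>
      cases seg with
      | nil =>
          have h1 : PySem.Chars.startswith ([] : List Char) ['<'] = false := by decide
          simp [goB, goBC, h1]
      | cons c body =>
          have hsw : PySem.Chars.startswith (c :: body) ['<'] = (c == '<') := by
            simp [PySem.Chars.startswith, List.isPrefixOf, eq_comm]
          have hsl : PySem.List.slice (c :: body) (some 1) none = body := by
            simpa using PySem.List.slice_from_one (c :: body)
          by_cases hc : c = '<'
          · subst hc
            by_cases hb : '<' ∈ body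
            · have hin : PySem.Chars.isIn ['<'] body = true := by
                rw [PySem.Chars.isIn_iff_infix]
                exact (List.singleton_infix_iff '<' body).mpr hb
              simp [goB, goBC, hsw, hsl, hin, hb]
            · have hin : PySem.Chars.isIn ['<'] body = false := by
                apply Bool.eq_false_iff.mpr; intro hx
                exact hb ((List.singleton_infix_iff '<' body).mp
                  ((PySem.Chars.isIn_iff_infix ['<'] body).mp hx))
              have hstr : PySem.Str.slice (String.ofList ('<' :: body)) (some 1) none
                  = String.ofList body := by
                simpa using strOfList_slice_one ('<' :: body)
              simp [goB, goBC, hsw, hsl, hin, hb, hstr, ih]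
          · simp [goB, goBC, hsw, hsl, hc]

theorem getLast?_drop_or {α : Type} (l : List α) (n : Nat) (a : α) (h : l.getLast? = some a) :
    l.drop n = [] ∨ (l.drop n).getLast? = some a := by
  by_cases hd : l.drop n = []
  · exact Or.inl hd
  · right
    have : l = l.take n ++ l.drop n := (List.take_append_drop n l).symm
    rw [this, List.getLast?_append] at h
    cases hld : (l.drop n).getLast? with
    | none => exact absurd (List.getLast?_eq_none_iff.mp hld) hd
    | some b => rw [hld] at h; simpa [hld] using h

-- main: A's pure loop equals B's pass over the dropped-last split
theorem outerPure_eq_goBC_aux (n : Nat) : ∀ (l : List Char), l.length ≤ n →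
    (l = [] ∨ l.getLast? = some '>') → ∀ (tags : List String),
    outerPure l tags = goBC ((splitAux [] l).dropLast) tags := by
  induction n with
  | zero =>
      intro l hlen hl tags
      have : l = [] := by cases l <;> simp_all
      subst this
      simp [outerPure, splitAux, goBC]
  | succ n ihn =>
  intro l hlen hl tags
  cases l with
  | nil => simp [outerPure, splitAux, goBC]
  | cons c t =>
    have hlast : (c :: t).getLast? = some '>' := by
      rcases hl with h | h
      · exact absurd h (by simp)
      · exact h
    by_cases hc : c = '<'
    · subst hc
      have ht : t ≠ [] := by
        intro h; subst h; simp at hlast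
      have htl : t.getLast? = some '>' := by
        cases t with
        | nil => exact absurd rfl ht
        | cons b t' => simpa using hlast
      have hmem : '>' ∈ t := List.mem_of_getLast? htl
      have hsh : splitAux [] ('<' :: t)
          = ('<' :: (splitAux [] t).headI) :: (splitAux [] t).tail := by
        rw [show splitAux [] ('<' :: t) = splitAux ['<'] t by simp [splitAux],
            splitAux_shape t ['<']]
        simp
      have htail : (splitAux [] t).tail ≠ [] := by
        have hlen := splitAux_length [] t
        have hcnt : 0 < t.count '>' := List.count_pos_iff.mpr hmem
        intro h
        have := congrArg List.length h
        simp [List.length_tail, hlen] at this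
        omega
      have hdl : (splitAux [] ('<' :: t)).dropLast
          = ('<' :: (splitAux [] t).headI) :: (splitAux [] t).tail.dropLast := by
        rw [hsh, List.dropLast_cons_of_ne_nil htail]
      obtain ⟨hin1, hin2⟩ := innerPure_split t hmem
      by_cases hb : '<' ∈ (splitAux [] t).headI
      · rw [outerPure, hdl]
        simp [hin1 hb, goBC, hb]
      · obtain ⟨e1, e2, e3⟩ := hin2 hb
        rw [outerPure, hdl]
        simp only [ne_eq, not_true_eq_false, if_false, e1, e2, goBC, hb, if_false,
          reduceCtorEq, if_neg hb]
        have hrec := ihn (t.drop ((splitAux [] t).headI.length + 1))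
          (by simp at hlen ⊢; omega)
          (getLast?_drop_or t _ '>' htl)
          (tags ++ [String.ofList (splitAux [] t).headI])
        rw [e3] at hrec
        exact hrec
    · have hne : splitAux [] t ≠ [] := splitAux_ne_nil [] t
      by_cases hgt : c = '>'
      · subst hgt
        have hdl : (splitAux [] ('>' :: t)).dropLast
            = [] :: (splitAux [] t).dropLast := by
          rw [show splitAux [] ('>' :: t) = [] :: splitAux [] t by simp [splitAux],
              List.dropLast_cons_of_ne_nil hne]
        rw [outerPure, hdl]
        simp [goBC]
      · have ht : t ≠ [] := by
          intro h; subst h; simp at hlast; exact hgt hlast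
        have htl : t.getLast? = some '>' := by
          cases t with
          | nil => exact absurd rfl ht
          | cons b t' => simpa using hlast
        have hmem : '>' ∈ t := List.mem_of_getLast? htl
        have hsh : splitAux [] (c :: t)
            = (c :: (splitAux [] t).headI) :: (splitAux [] t).tail := by
          rw [show splitAux [] (c :: t) = splitAux [c] t by simp [splitAux, hgt],
              splitAux_shape t [c]]
          simp
        have htail : (splitAux [] t).tail ≠ [] := by
          have hlen := splitAux_length [] t
          have hcnt : 0 < t.count '>' := List.count_pos_iff.mpr hmem
          intro h
          have := congrArg List.length h
          simp [List.length_tail, hlen] at this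
          omega
        have hdl : (splitAux [] (c :: t)).dropLast
            = (c :: (splitAux [] t).headI) :: (splitAux [] t).tail.dropLast := by
          rw [hsh, List.dropLast_cons_of_ne_nil htail]
        rw [outerPure, hdl]
        simp [goBC, hc]

theorem outerPure_eq_goBC (l : List Char) (hl : l = [] ∨ l.getLast? = some '>')
    (tags : List String) :
    outerPure l tags = goBC ((splitAux [] l).dropLast) tags :=
  outerPure_eq_goBC_aux l.length l (Nat.le_refl _) hl tags

-- ===== VERDICT (by name: the statement is the Claim_ definition above) =====
theorem to_tags_spec : Claim_equal_to_tags := by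
  intro xml hdom hpre
  unfold Spec_to_tags
  have hne : xml.toList ≠ [] := fun h => hpre (String.toList_eq_nil_iff.mp h)
  cases hcs : xml.toList with
  | nil => exact absurd hcs hne
  | cons c0 rest =>
  have hlen : 0 < xml.toList.length := by rw [hcs]; simp
  have hget0 : PySem.List.pyGet? xml.toList 0 = some c0 := by
    have := PySem.List.pyGet?_natCast xml.toList 0
    simp at this
    simp [this, hcs]
  have hgetl : PySem.List.pyGet? xml.toList (-1)
      = xml.toList.getLast? := by
    simp [PySem.List.pyGet?, PySem.List.pyIdx?, hcs]
    rw [List.getLast?_eq_getElem?]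
    simp
  have hlastne : xml.toList.getLast? = some ((c0 :: rest).getLast ( by simp)) := by
    rw [hcs]; exact List.getLast?_eq_getLast _
  unfold to_tags to_tags_alt
  simp only [PySem.Str.pyGet?_eq, PySem.Chars.pyGet?_eq_listPyGet?, hget0, hgetl, hlastne]
  set cl := (c0 :: rest).getLast (by simp) with hcl
  by_cases hguard : c0 ≠ '<' ∨ cl ≠ '>'
  · simp [hguard]
  · simp only [hguard, if_false]
    push_neg at hguard
    obtain ⟨h0, h1⟩ := hguard
    have hsplit : PySem.Str.split? xml ">"
        = some ((splitAux [] xml.toList).map String.ofList) := by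
      rw [PySem.Str.split?]
      have : PySem.Chars.split? xml.toList ">".toList
          = some (splitAux [] xml.toList) := by
        rw [show (">".toList) = ['>'] from rfl, PySem.Chars.split?]
        simp [splitOn_eq]
      rw [this]
      rfl
    rw [hsplit]
    simp only [PySem.List.slice_to_neg_one]
    rw [← List.map_dropLast, goB_eq_goBC]
    rw [outer_eq xml.toList 0 0 [] hlen, List.drop_zero]
    apply outerPure_eq_goBC
    right
    rw [hcs] at hlastne ⊢
    rw [hlastne, h1]
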